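-- pv_equiv track=rewrite | github.com/gwk/pithy | pithy/string.py | clip_common
-- ===== SOURCE A (Python) =====
-- from typing import Any, Callable, cast, Iterable, Iterator, Sequence, TypeVar, Union
--
-- def clip_common(strings:Sequence[str], prefix=True, suffix=True) -> tuple[str,...]:
--   if not strings: return ()
--   if len(strings) == 1: return ('',)
--   first = strings[0]
--   min_len = min(len(s) for s in strings)
--   i = 0
--   if prefix:
--     while i < min_len and all(s[i] == first[i] for s in strings):
--       i += 1
--   l = -1 # Last index.
--   if suffix:
--     l_term = i - min_len # The final negative index before we would clip everything from `i` to end.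
--     while l > l_term and all(s[l] == first[l] for s in strings):
--       l -= 1
--   return tuple(s[i:l] for s in strings)
-- ===== SOURCE B (Python) =====
-- def _match_len(a, b, bound):
--   # number of leading positions where a and b agree, capped at bound (bound <= len(a))
--   n = min(bound, len(b))
--   k = 0
--   while k < n and a[k] == b[k]:
--     k += 1
--   return k
--
-- def clip_common(strings, prefix=True, suffix=True):
--   if not strings: return ()
--   if len(strings) == 1: return ('',)
--   first = strings[0]
--   rest = strings[1:]
--   min_len = min(len(s) for s in strings)
--   i = 0
--   if prefix:
--     i = len(first)
--     for s in rest: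
--       i = _match_len(first, s, i)
--   m = 0
--   if suffix:
--     cap = min_len - i - 1
--     if cap > 0:
--       m = cap
--       rf = first[::-1]
--       for s in rest:
--         m = _match_len(rf, s[::-1], m)
--   return tuple(s[i:-(m+1)] for s in strings)
-- ===== Notes on version B (the rewrite author's own statement) =====
-- stated objective: alternative
-- what changed: A scans position by position, re-checking every string with an all() generator at each index for both prefix and suffix; B instead folds once over the strings, maintaining a running capped match count against the first string (and its reverse), then derives the same slice bounds arithmetically.
import Mathlib
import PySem

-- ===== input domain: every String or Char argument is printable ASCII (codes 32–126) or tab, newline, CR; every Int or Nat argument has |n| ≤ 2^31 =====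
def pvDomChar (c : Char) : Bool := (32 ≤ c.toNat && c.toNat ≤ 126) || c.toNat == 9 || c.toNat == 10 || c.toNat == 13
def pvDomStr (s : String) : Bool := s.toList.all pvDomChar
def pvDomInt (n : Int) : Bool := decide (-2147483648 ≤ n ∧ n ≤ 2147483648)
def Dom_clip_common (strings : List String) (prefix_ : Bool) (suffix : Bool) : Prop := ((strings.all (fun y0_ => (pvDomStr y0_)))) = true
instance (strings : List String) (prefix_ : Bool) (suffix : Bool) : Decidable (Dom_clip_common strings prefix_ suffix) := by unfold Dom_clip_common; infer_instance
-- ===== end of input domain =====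

-- B replaces A's per-position loops (each position re-scanning every string with all())
-- by a single fold over the strings, maintaining the running common prefix / suffix
-- match count with the first string (objective: alternative algorithm, same cost class).

-- ===== PORT A =====
-- all(s[idx] == first[idx] for s in strings)
def pvAllEq (cs : List (List Char)) (first : List Char) (idx : Int) : Bool :=
  cs.all (fun s => PySem.List.pyGet? s idx == PySem.List.pyGet? first idx)

-- `while i < min_len and all(...): i += 1` (fuel-bounded; fuel = min_len suffices)
def pvAPrefix (cs : List (List Char)) (first : List Char) (minLen : Nat) : Nat → Nat → Nat
  | 0, i => i
  | fuel + 1, i =>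
    if i < minLen ∧ pvAllEq cs first (i : Int) then pvAPrefix cs first minLen fuel (i + 1) else i

-- `while l > l_term and all(...): l -= 1` (fuel-bounded; fuel = min_len suffices)
def pvASuffix (cs : List (List Char)) (first : List Char) (lTerm : Int) : Nat → Int → Int
  | 0, l => l
  | fuel + 1, l =>
    if lTerm < l ∧ pvAllEq cs first l then pvASuffix cs first lTerm fuel (l - 1) else l

def clip_common (strings : List String) (prefix_ : Bool) (suffix : Bool) : List String :=
  match strings with
  | [] => []
  | s0 :: _ =>
    if strings.length == 1 then [""]
    else
      let first := s0.toList
      let cs := strings.map String.toList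
      let minLen : Nat := (cs.map List.length).foldl Nat.min first.length
      let i : Nat := if prefix_ then pvAPrefix cs first minLen minLen 0 else 0
      let l : Int := if suffix then pvASuffix cs first ((i : Int) - (minLen : Int)) minLen (-1) else -1
      strings.map (fun t => String.mk (PySem.List.slice t.toList (some (i : Int)) (some l)))

-- ===== PORT B =====
-- _match_len(a, b, bound): leading agreement count of a and b, capped at bound
def pvMatchLen : List Char → List Char → Nat → Nat
  | a :: as_, b :: bs, n + 1 => if a = b then pvMatchLen as_ bs n + 1 else 0
  | _, _, _ => 0

def clip_common_alt (strings : List String) (prefix_ : Bool) (suffix : Bool) : List String :=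
  match strings with
  | [] => []
  | s0 :: rest =>
    if strings.length == 1 then [""]
    else
      let first := s0.toList
      let rs := rest.map String.toList
      let minLen : Nat := ((strings.map String.toList).map List.length).foldl Nat.min first.length
      let i : Nat := if prefix_ then rs.foldl (fun acc t => pvMatchLen first t acc) first.length else 0
      let m : Nat :=
        if suffix then
          let cap : Int := (minLen : Int) - (i : Int) - 1
          if 0 < cap then rs.foldl (fun acc t => pvMatchLen first.reverse t.reverse acc) cap.toNat
          else 0
        else 0
      strings.map (fun t => String.mk (PySem.List.slice t.toList (some (i : Int)) (some (-((m : Int) + 1)))))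

-- ===== PRECONDITION & SPEC =====
def Spec_clip_common (strings : List String) (prefix_ : Bool) (suffix : Bool) (out : List String) : Prop := out = clip_common_alt strings prefix_ suffix
instance (strings : List String) (prefix_ : Bool) (suffix : Bool) (out : List String) : Decidable (Spec_clip_common strings prefix_ suffix out) := by unfold Spec_clip_common; infer_instance

-- ===== CLAIM (what is proved, stated in full; the proofs are below) =====
def Claim_equal_clip_common : Prop := ∀ (strings : List String) (prefix_ : Bool) (suffix : Bool), Dom_clip_common strings prefix_ suffix → Spec_clip_common strings prefix_ suffix (clip_common strings prefix_ suffix)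

-- ===== LEMMAS AND PROOFS =====

-- uncapped common-prefix length (proof-only helper)
def pvCpl : List Char → List Char → Nat
  | a :: as_, b :: bs => if a = b then pvCpl as_ bs + 1 else 0
  | _, _ => 0

theorem pvMatchLen_eq_min (a b : List Char) (n : Nat) :
    pvMatchLen a b n = min n (pvCpl a b) := by
  induction a generalizing b n with
  | nil => cases b <;> cases n <;> simp [pvMatchLen, pvCpl]
  | cons x as_ ih =>
    cases b with
    | nil => cases n <;> simp [pvMatchLen, pvCpl]
    | cons y bs =>
      cases n with
      | zero => simp [pvMatchLen, pvCpl]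
      | succ n =>
        by_cases h : x = y <;> simp [pvMatchLen, pvCpl, h, ih] <;> omega

theorem pvCpl_le_right (a b : List Char) : pvCpl a b ≤ b.length := by
  induction a generalizing b with
  | nil => simp [pvCpl]
  | cons x as_ ih =>
    cases b with
    | nil => simp [pvCpl]
    | cons y bs =>
      by_cases h : x = y
      · simp only [pvCpl, if_pos h, List.length_cons]
        have := ih bs; omega
      · simp [pvCpl, h]

theorem pvCpl_get_eq (a b : List Char) (k : Nat) (hk : k < pvCpl a b) :
    a[k]? = b[k]? := by
  induction a generalizing b k with
  | nil => simp [pvCpl] at hk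
  | cons x as_ ih =>
    cases b with
    | nil => simp [pvCpl] at hk
    | cons y bs =>
      by_cases h : x = y
      · cases k with
        | zero => simp [h]
        | succ k =>
          simp only [pvCpl, if_pos h] at hk
          simpa using ih bs k (by omega)
      · simp [pvCpl, h] at hk

theorem pvCpl_get_ne (a b : List Char) (ha : pvCpl a b < a.length)
    (hb : pvCpl a b < b.length) : a[pvCpl a b]? ≠ b[pvCpl a b]? := by
  induction a generalizing b with
  | nil => simp at ha
  | cons x as_ ih =>
    cases b with
    | nil => simp at hb
    | cons y bs =>
      by_cases h : x = y
      · simp only [pvCpl, if_pos h] at ha hb ⊢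
        have := ih bs (by simpa using ha) (by simpa using hb)
        simpa using this
      · simp [pvCpl, h]

theorem pv_foldl_min_lt (xs : List Nat) (init k : Nat) :
    k < xs.foldl Nat.min init ↔ k < init ∧ ∀ x ∈ xs, k < x := by
  induction xs generalizing init with
  | nil => simp
  | cons y ys ih =>
    simp only [List.foldl_cons, ih, List.mem_cons]
    constructor
    · rintro ⟨h1, h2⟩
      refine ⟨lt_of_lt_of_le h1 (Nat.min_le_left _ _), ?_⟩
      rintro x (rfl | hx)
      · exact lt_of_lt_of_le h1 (Nat.min_le_right _ _)
      · exact h2 x hx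
    · rintro ⟨h1, h2⟩
      exact ⟨lt_min h1 (h2 y (Or.inl rfl)), fun x hx => h2 x (Or.inr hx)⟩

theorem pv_foldl_min_le (xs : List Nat) (init : Nat) (x : Nat) (hx : x ∈ xs) :
    xs.foldl Nat.min init ≤ x := by
  by_contra h
  have := ((pv_foldl_min_lt xs init x).1 (by omega)).2 x hx
  omega

theorem pv_foldl_min_le_init (xs : List Nat) (init : Nat) :
    xs.foldl Nat.min init ≤ init := by
  by_contra h
  have := ((pv_foldl_min_lt xs init init).1 (by omega)).1
  omega

-- B's fold is a fold of Nat.min over the capped common-prefix lengths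
theorem pv_fold_matchLen (first : List Char) (rs : List (List Char)) (acc : Nat) :
    rs.foldl (fun acc t => pvMatchLen first t acc) acc
      = (rs.map (pvCpl first)).foldl Nat.min acc := by
  induction rs generalizing acc with
  | nil => rfl
  | cons t ts ih =>
    rw [List.foldl_cons, List.map_cons, List.foldl_cons, pvMatchLen_eq_min]
    exact ih _

theorem pv_fold_matchLen_rev (first : List Char) (rs : List (List Char)) (acc : Nat) :
    rs.foldl (fun acc t => pvMatchLen first.reverse t.reverse acc) acc
      = ((rs.map List.reverse).map (pvCpl first.reverse)).foldl Nat.min acc := by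
  induction rs generalizing acc with
  | nil => rfl
  | cons t ts ih =>
    rw [List.foldl_cons, List.map_cons, List.map_cons, List.foldl_cons, pvMatchLen_eq_min]
    exact ih _

-- while-loop characterization for A's prefix loop
theorem pvAPrefix_eq (cs : List (List Char)) (first : List Char) (minLen T : Nat)
    (hc : ∀ k, k ≤ T → ((k < minLen ∧ pvAllEq cs first (k : Int) = true) ↔ k < T)) :
    ∀ fuel i, i ≤ T → T ≤ i + fuel → pvAPrefix cs first minLen fuel i = T := by
  intro fuel
  induction fuel with
  | zero => intro i h1 h2; simp only [pvAPrefix]; omega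
  | succ fuel ih =>
    intro i h1 h2
    by_cases hi : i < T
    · rw [pvAPrefix, if_pos ((hc i h1).2 hi)]
      exact ih (i + 1) (by omega) (by omega)
    · have : i = T := by omega
      subst this
      rw [pvAPrefix, if_neg (by intro h; exact absurd ((hc i h1).1 h) (by omega))]

-- while-loop characterization for A's suffix loop (l = -(1+k))
theorem pvASuffix_eq (cs : List (List Char)) (first : List Char) (lTerm : Int) (G : Nat)
    (hc : ∀ k : Nat, k ≤ G →
      ((lTerm < -(1 + (k : Int)) ∧ pvAllEq cs first (-(1 + (k : Int))) = true) ↔ k < G)) :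
    ∀ fuel (k : Nat), k ≤ G → G ≤ k + fuel →
      pvASuffix cs first lTerm fuel (-(1 + (k : Int))) = -(1 + (G : Int)) := by
  intro fuel
  induction fuel with
  | zero =>
    intro k h1 h2
    have : k = G := by omega
    subst this; simp [pvASuffix]
  | succ fuel ih =>
    intro k h1 h2
    by_cases hk : k < G
    · rw [pvASuffix, if_pos ((hc k h1).2 hk)]
      have hcast : -(1 + (k : Int)) - 1 = -(1 + ((k + 1 : Nat) : Int)) := by push_cast; ring
      rw [hcast]
      exact ih (k + 1) (by omega) (by omega)
    · have : k = G := by omega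
      subst this
      rw [pvASuffix, if_neg (by intro h; exact absurd ((hc k h1).1 h) (by omega))]

-- pvAllEq at a nonnegative index, unfolded
theorem pvAllEq_nat (cs : List (List Char)) (first : List Char) (k : Nat) :
    pvAllEq cs first (k : Int) = true ↔ ∀ t ∈ cs, t[k]? = first[k]? := by
  simp [pvAllEq, List.all_eq_true, PySem.List.pyGet?_natCast, beq_iff_eq]

-- negative index = index into the reverse
theorem pv_pyGet_neg (s : List Char) (k : Nat) (h : k + 1 ≤ s.length) :
    PySem.List.pyGet? s (-(1 + (k : Int))) = s.reverse[k]? := by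
  have h1 : -(1 + (k : Int)) = -(((k + 1 : Nat) : Int)) := by push_cast; ring
  rw [h1, PySem.List.pyGet?_neg_natCast s (k + 1) (by omega) (by omega),
    List.getElem?_reverse (by omega)]
  congr 1
  omega

theorem pvAllEq_neg (cs : List (List Char)) (first : List Char) (k : Nat)
    (hall : ∀ t ∈ cs, k + 1 ≤ t.length) (hf : k + 1 ≤ first.length) :
    pvAllEq cs first (-(1 + (k : Int))) = true ↔
      ∀ t ∈ cs, t.reverse[k]? = first.reverse[k]? := by
  simp only [pvAllEq, List.all_eq_true, beq_iff_eq]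
  constructor
  · intro h t ht
    have := h t ht
    rwa [pv_pyGet_neg t k (hall t ht), pv_pyGet_neg first k hf] at this
  · intro h t ht
    rw [pv_pyGet_neg t k (hall t ht), pv_pyGet_neg first k hf]
    exact h t ht

-- the position-k test is equivalent to k < cpl, given agreement up to k
theorem pv_step (a b : List Char) (k : Nat)
    (ha : k < a.length) (hb : k < b.length) (hcpl : k ≤ pvCpl a b) :
    (b[k]? = a[k]? ↔ k < pvCpl a b) := by
  constructor
  · intro h
    rcases Nat.lt_or_ge k (pvCpl a b) with h' | h'
    · exact h'
    · have hk : pvCpl a b = k := by omega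
      rw [← hk] at ha hb h
      exact absurd h.symm (pvCpl_get_ne a b ha hb)
  · intro h
    exact (pvCpl_get_eq a b k h).symm

-- main equality of the computed prefix index
theorem pv_i_eq (first : List Char) (rs : List (List Char)) :
    pvAPrefix (first :: rs) first
        (((first :: rs).map List.length).foldl Nat.min first.length)
        (((first :: rs).map List.length).foldl Nat.min first.length) 0
      = rs.foldl (fun acc t => pvMatchLen first t acc) first.length := by
  set minLen := ((first :: rs).map List.length).foldl Nat.min first.length with hml
  rw [pv_fold_matchLen]
  set F := (rs.map (pvCpl first)).foldl Nat.min first.length with hF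
  have hFchar : ∀ k, k < F ↔ k < first.length ∧ ∀ t ∈ rs, k < pvCpl first t := by
    intro k
    rw [hF, pv_foldl_min_lt]
    simp
  have hMchar : ∀ k, k < minLen ↔ k < first.length ∧ ∀ t ∈ first :: rs, k < t.length := by
    intro k
    rw [hml, pv_foldl_min_lt]
    simp
  have hFM : F ≤ minLen := by
    by_contra h
    have h2 := (hFchar minLen).1 (by omega)
    have : minLen < minLen := (hMchar minLen).2 ⟨h2.1, by
      intro t ht
      rcases List.mem_cons.1 ht with rfl | ht'
      · exact h2.1
      · exact lt_of_lt_of_le (h2.2 t ht') (pvCpl_le_right first t)⟩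
    omega
  apply pvAPrefix_eq
  · intro k hk
    rw [pvAllEq_nat]
    constructor
    · rintro ⟨hkm, hall⟩
      rw [hFchar]
      have hkf : k < first.length := ((hMchar k).1 hkm).1
      refine ⟨hkf, fun t ht => ?_⟩
      have hkt : k < t.length := ((hMchar k).1 hkm).2 t (List.mem_cons_of_mem _ ht)
      have hcpl : k ≤ pvCpl first t := le_trans hk (pv_foldl_min_le _ _ _ (List.mem_map_of_mem ht))
      exact (pv_step first t k hkf hkt hcpl).1 (hall t (List.mem_cons_of_mem _ ht))
    · intro hkF
      have h2 := (hFchar k).1 hkF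
      have hkm : k < minLen := (hMchar k).2 ⟨h2.1, by
        intro t ht
        rcases List.mem_cons.1 ht with rfl | ht'
        · exact h2.1
        · exact lt_of_lt_of_le (h2.2 t ht') (pvCpl_le_right first t)⟩
      refine ⟨hkm, ?_⟩
      intro t ht
      rcases List.mem_cons.1 ht with rfl | ht'
      · rfl
      · exact (pvCpl_get_eq first t k (h2.2 t ht')).symm
  · omega
  · omega

-- main equality of the suffix bound: A's final l equals -(G+1)
theorem pv_l_eq (first : List Char) (rs : List (List Char)) (i : Nat)
    (hil : i ≤ ((first :: rs).map List.length).foldl Nat.min first.length) :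
    pvASuffix (first :: rs) first
        ((i : Int) - ((((first :: rs).map List.length).foldl Nat.min first.length : Nat) : Int))
        (((first :: rs).map List.length).foldl Nat.min first.length) (-1)
      = -(1 + ((((rs.map List.reverse).map (pvCpl first.reverse)).foldl Nat.min
          (((first :: rs).map List.length).foldl Nat.min first.length - i - 1) : Nat) : Int)) := by
  set minLen := ((first :: rs).map List.length).foldl Nat.min first.length with hml
  have hMchar : ∀ k, k < minLen ↔ k < first.length ∧ ∀ t ∈ first :: rs, k < t.length := by
    intro k
    rw [hml, pv_foldl_min_lt]
    simp
  have hMle : ∀ t ∈ first :: rs, minLen ≤ t.length := by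
    intro t ht
    by_contra h
    have h2 := (hMchar t.length).1 (by omega)
    have := h2.2 t ht
    omega
  set capN : Nat := minLen - i - 1 with hcap
  set G := ((rs.map List.reverse).map (pvCpl first.reverse)).foldl Nat.min capN with hG
  have hGchar : ∀ k, k < G ↔ k < capN ∧ ∀ t ∈ rs, k < pvCpl first.reverse t.reverse := by
    intro k
    rw [hG, pv_foldl_min_lt]
    simp
  have hGcap : G ≤ capN := pv_foldl_min_le_init _ _
  have hmain : ∀ k : Nat, k ≤ G →
      ((((i : Int) - (minLen : Int)) < -(1 + (k : Int)) ∧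
        pvAllEq (first :: rs) first (-(1 + (k : Int))) = true) ↔ k < G) := by
    intro k hk
    constructor
    · rintro ⟨h1, hall⟩
      have hkcap : k < capN := by omega
      have hklen : ∀ t ∈ first :: rs, k + 1 ≤ t.length := by
        intro t ht
        have := hMle t ht
        omega
      rw [pvAllEq_neg _ _ _ hklen (hklen first List.mem_cons_self)] at hall
      rw [hGchar]
      refine ⟨hkcap, fun t ht => ?_⟩
      have hcpl : k ≤ pvCpl first.reverse t.reverse :=
        le_trans hk (pv_foldl_min_le _ _ _ (by
          simp only [List.map_map, List.mem_map]
          exact ⟨t, ht, rfl⟩))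
      have hkf : k < first.reverse.length := by
        have := hklen first List.mem_cons_self
        simp only [List.length_reverse]
        omega
      have hkt : k < t.reverse.length := by
        have := hklen t (List.mem_cons_of_mem _ ht)
        simp only [List.length_reverse]
        omega
      exact (pv_step first.reverse t.reverse k hkf hkt hcpl).1
        (hall t (List.mem_cons_of_mem _ ht))
    · intro hkG
      have h2 := (hGchar k).1 hkG
      have hkcap : k < capN := h2.1
      have h1 : ((i : Int) - (minLen : Int)) < -(1 + (k : Int)) := by omega
      have hklen : ∀ t ∈ first :: rs, k + 1 ≤ t.length := by
        intro t ht
        have := hMle t ht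
        omega
      refine ⟨h1, ?_⟩
      rw [pvAllEq_neg _ _ _ hklen (hklen first List.mem_cons_self)]
      intro t ht
      rcases List.mem_cons.1 ht with rfl | ht'
      · rfl
      · exact (pvCpl_get_eq first.reverse t.reverse k (h2.2 t ht')).symm
  have h0 : pvASuffix (first :: rs) first ((i : Int) - (minLen : Int)) minLen (-(1 + ((0 : Nat) : Int)))
      = -(1 + (G : Int)) := pvASuffix_eq _ _ _ G hmain minLen 0 (by omega) (by omega)
  have hneg : (-(1 + ((0 : Nat) : Int))) = (-1 : Int) := by norm_num
  rw [hneg] at h0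
  exact h0

-- ===== VERDICT (by name: the statement is the Claim_ definition above) =====
theorem clip_common_spec : Claim_equal_clip_common := by
  intro strings prefix_ suffix _
  unfold Spec_clip_common
  match strings with
  | [] => rfl
  | [s] => rfl
  | s0 :: s1 :: rest =>
    simp only [clip_common, clip_common_alt]
    have hlen : ((s0 :: s1 :: rest).length == 1) = false := by simp
    rw [hlen]
    simp only [Bool.false_eq_true, if_false]
    have hmap : (s0 :: s1 :: rest).map String.toList = s0.toList :: (s1 :: rest).map String.toList := rfl
    set first := s0.toList with hf
    set rs := (s1 :: rest).map String.toList with hrs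
    rw [hmap]
    set minLen := (((first :: rs).map List.length).foldl Nat.min first.length) with hml
    have hi : (if prefix_ then pvAPrefix (first :: rs) first minLen minLen 0 else 0)
        = (if prefix_ then rs.foldl (fun acc t => pvMatchLen first t acc) first.length else 0) := by
      cases prefix_
      · rfl
      · simp only [if_pos trivial]
        rw [hml]
        exact pv_i_eq first rs
    rw [hi]
    set i := (if prefix_ then rs.foldl (fun acc t => pvMatchLen first t acc) first.length else 0) with hidef
    have hil : i ≤ minLen := by
      cases prefix_
      · simp [hidef]
      · simp only [hidef, if_pos trivial]
        rw [pv_fold_matchLen]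
        by_contra h
        have hchar := (pv_foldl_min_lt ((rs.map (pvCpl first))) first.length minLen).1 (by omega)
        have : minLen < minLen := by
          rw [hml, pv_foldl_min_lt]
          refine ⟨hchar.1, ?_⟩
          simp only [List.mem_map, forall_exists_index, and_imp]
          rintro x t ht rfl
          rcases List.mem_cons.1 ht with rfl | ht'
          · exact hchar.1
          · exact lt_of_lt_of_le (hchar.2 _ (List.mem_map_of_mem ht')) (pvCpl_le_right first t)
        omega
    have hmB : (if suffix then
          (if 0 < ((minLen : Int) - (i : Int) - 1) then
            rs.foldl (fun acc t => pvMatchLen first.reverse t.reverse acc)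
              (((minLen : Int) - (i : Int) - 1).toNat)
          else 0)
        else 0)
        = (if suffix then
            ((rs.map List.reverse).map (pvCpl first.reverse)).foldl Nat.min (minLen - i - 1)
          else 0) := by
    -- the Int cap and the Nat cap agree; when the cap is ≤ 0 the fold from 0 is 0
      cases suffix
      · rfl
      · simp only [if_pos trivial]
        by_cases h : 0 < ((minLen : Int) - (i : Int) - 1)
        · rw [if_pos h, pv_fold_matchLen_rev]
          congr 1
          omega
        · rw [if_neg h]
          have hc0 : minLen - i - 1 = 0 := by omega
          rw [hc0]
          have := pv_foldl_min_le_init ((rs.map List.reverse).map (pvCpl first.reverse)) 0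
          omega
    have hl : (if suffix then pvASuffix (first :: rs) first ((i : Int) - (minLen : Int)) minLen (-1) else -1)
        = -(((if suffix then
              ((rs.map List.reverse).map (pvCpl first.reverse)).foldl Nat.min (minLen - i - 1)
            else 0 : Nat) : Int) + 1) := by
      cases suffix
      · norm_num
      · simp only [if_pos trivial]
        rw [hml] at hil ⊢
        have := pv_l_eq first rs i hil
        rw [this]
        ring
    rw [hmB, hl]
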